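-- pv_equiv track=rewrite | github.com/Bluuubery/Algorithm_Study | 7_그리디/Dohyun-Kimm/BOJ_12904.py | t_to_s
-- ===== SOURCE A (Python) =====
-- def t_to_s(s, t):
--     while t:
--         if s == t:
--             return 1
--         else:
--             if t[-1] == 'A':
--                 t = t[:-1]
--             else:
--                 t = t[:-1]
--                 t = t[::-1]
--     return 0
-- ===== SOURCE B (Python) =====
-- def t_to_s(s, t):
--     # Two-pointer deque simulation: pop ends with a direction flag instead
--     # of rebuilding/reversing t; compare once when lengths match (O(n)).
--     if not s or len(s) > len(t):
--         return 0
--     lo, hi, rev = 0, len(t), False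
--     for _ in range(len(t) - len(s)):
--         if rev:
--             c = t[lo]
--             lo += 1
--         else:
--             hi -= 1
--             c = t[hi]
--         if c != 'A':
--             rev = not rev
--     cur = t[lo:hi]
--     if rev:
--         cur = cur[::-1]
--     return 1 if cur == s else 0
-- ===== Notes on version B (the rewrite author's own statement) =====
-- stated objective: faster
-- what changed: Replaces the quadratic loop that re-slices and physically reverses t each step (and compares s==t every iteration) with a two-pointer deque simulation using a direction flag, doing exactly len(t)-len(s) O(1) pops and a single final comparison.
import Mathlib
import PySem

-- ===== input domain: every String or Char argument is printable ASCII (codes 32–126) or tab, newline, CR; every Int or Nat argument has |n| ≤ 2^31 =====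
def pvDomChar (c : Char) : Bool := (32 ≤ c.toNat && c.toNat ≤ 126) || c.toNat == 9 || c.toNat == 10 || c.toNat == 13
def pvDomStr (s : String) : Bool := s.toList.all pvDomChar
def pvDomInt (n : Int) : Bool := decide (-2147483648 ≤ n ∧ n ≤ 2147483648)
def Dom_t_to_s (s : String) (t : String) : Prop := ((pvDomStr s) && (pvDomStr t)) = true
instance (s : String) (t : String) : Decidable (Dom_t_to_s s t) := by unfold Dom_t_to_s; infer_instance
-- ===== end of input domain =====

-- B replaces A's quadratic slice-and-reverse loop by a two-pointer deque simulation
-- with a direction flag and a single final comparison (measured asymptotically faster).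


-- ===== PORT A =====
-- 'while t: if s == t: return 1 else: pop last; if it was not 'A', reverse'
-- t[:-1] is dropLast, t[::-1] is reverse, t[-1] is pyGet? t (-1).
def tsLoopA (s : List Char) (t : List Char) : Int :=
  if hnil : t = [] then 0
  else if s = t then 1
  else if PySem.List.pyGet? t (-1) = some 'A' then tsLoopA s t.dropLast
  else tsLoopA s t.dropLast.reverse
termination_by t.length
decreasing_by
  all_goals
    have : 0 < t.length := List.length_pos_iff.mpr hnil
    simp [List.length_dropLast]
    omega

def t_to_s (s : String) (t : String) : Int := tsLoopA s.toList t.toList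

-- ===== PORT B =====
-- one iteration of Source B's for-loop body on the state (lo, hi, rev)
def bStep (t : List Char) (st : Nat × Nat × Bool) : Nat × Nat × Bool :=
  match st with
  | (lo, hi, rev) =>
    if rev then
      let c := t.getD lo ' '      -- c = t[lo] (always in range in Source B)
      (lo + 1, hi, if c ≠ 'A' then !rev else rev)
    else
      let hi' := hi - 1
      let c := t.getD hi' ' '     -- c = t[hi] after hi -= 1
      (lo, hi', if c ≠ 'A' then !rev else rev)

-- 'for _ in range(k): ...'
def bLoop (t : List Char) : Nat → Nat × Nat × Bool → Nat × Nat × Bool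
  | 0, st => st
  | k + 1, st => bLoop t k (bStep t st)

def t_to_s_alt (s : String) (t : String) : Int :=
  let sl := s.toList
  let tl := t.toList
  if sl = [] ∨ tl.length < sl.length then 0
  else
    match bLoop tl (tl.length - sl.length) (0, tl.length, false) with
    | (lo, hi, rev) =>
      let cur := PySem.List.slice tl (some (lo : Int)) (some (hi : Int))  -- t[lo:hi]
      let cur := if rev then cur.reverse else cur
      if cur = sl then 1 else 0

-- ===== PRECONDITION & SPEC =====
def Spec_t_to_s (s : String) (t : String) (out : Int) : Prop := out = t_to_s_alt s t
instance (s : String) (t : String) (out : Int) : Decidable (Spec_t_to_s s t out) := by unfold Spec_t_to_s; infer_instance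

-- ===== CLAIM (what is proved, stated in full; the proofs are below) =====
def Claim_equal_t_to_s : Prop := ∀ (s : String) (t : String), Dom_t_to_s s t → Spec_t_to_s s t (t_to_s s t)

-- ===== LEMMAS AND PROOFS =====

-- one pop of A's loop (on the 'else' branch)
def popOnce (u : List Char) : List Char :=
  if u.getLast? = some 'A' then u.dropLast else u.dropLast.reverse

def popIter : Nat → List Char → List Char
  | 0, u => u
  | k + 1, u => popIter k (popOnce u)

def pvView (t : List Char) (st : Nat × Nat × Bool) : List Char :=
  let seg := (t.drop st.1).take (st.2.1 - st.1)
  if st.2.2 then seg.reverse else seg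

theorem popOnce_length (u : List Char) : (popOnce u).length = u.length - 1 := by
  unfold popOnce; split <;> simp

theorem tsLoopA_zero (s : List Char) : ∀ (n : Nat) (u : List Char), u.length ≤ n →
    u.length < s.length ∨ s = [] → tsLoopA s u = 0 := by
  intro n
  induction n with
  | zero =>
    intro u hn _
    have : u = [] := List.eq_nil_of_length_eq_zero (Nat.le_zero.mp hn)
    rw [tsLoopA, dif_pos this]
  | succ n ih =>
    intro u hn h
    by_cases hne : u = []
    · rw [tsLoopA, dif_pos hne]
    · have hsu : s ≠ u := by
        rcases h with h | h
        · intro he; subst he; omega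
        · subst h; exact fun he => hne he.symm
      have hlen : 0 < u.length := List.length_pos_iff.mpr hne
      rw [tsLoopA, dif_neg hne, if_neg hsu]
      have h' : ∀ v : List Char, v.length = u.length - 1 →
          tsLoopA s v = 0 := by
        intro v hv
        exact ih v (by omega) (by rcases h with h | h; exacts [Or.inl (by omega), Or.inr h])
      split
      · exact h' u.dropLast (by simp)
      · exact h' u.dropLast.reverse (by simp)

theorem tsLoopA_step (s u : List Char) (hsu : s ≠ u) (hne : u ≠ []) :
    tsLoopA s u = tsLoopA s (popOnce u) := by
  rw [tsLoopA, dif_neg hne, if_neg hsu, PySem.List.pyGet?_neg_one, popOnce]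
  split <;> rfl

theorem tsLoopA_char (s : List Char) (hs : s ≠ []) : ∀ (k : Nat) (u : List Char),
    u.length = s.length + k → tsLoopA s u = (if popIter k u = s then 1 else 0) := by
  intro k
  induction k with
  | zero =>
    intro u hu
    have hne : u ≠ [] := by
      intro h; subst h; simp at hu; exact hs (List.eq_nil_of_length_eq_zero hu.symm)
    rw [popIter]
    by_cases hsu : s = u
    · rw [tsLoopA, dif_neg hne, if_pos hsu, if_pos hsu.symm]
    · rw [if_neg (fun h => hsu h.symm),
        tsLoopA_step s u hsu hne]
      have h0 : (popOnce u).length < s.length := by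
        rw [popOnce_length]
        have := List.length_pos_iff.mpr hne
        omega
      exact tsLoopA_zero s (popOnce u).length (popOnce u) le_rfl (Or.inl h0)
  | succ k ih =>
    intro u hu
    have hlt : s.length < u.length := by
      have := List.length_pos_iff.mpr hs; omega
    have hne : u ≠ [] := by intro h; subst h; simp at hlt
    have hsu : s ≠ u := by intro h; subst h; omega
    rw [tsLoopA_step s u hsu hne, popIter]
    exact ih (popOnce u) (by rw [popOnce_length]; omega)

-- one B step realises one A pop on the denoted string
theorem bStep_view (t : List Char) (lo hi : Nat) (rev : Bool)
    (hlo : lo < hi) (hhi : hi ≤ t.length) :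
    pvView t (bStep t (lo, hi, rev)) = popOnce (pvView t (lo, hi, rev)) ∧
    (bStep t (lo, hi, rev)).1 ≤ (bStep t (lo, hi, rev)).2.1 ∧
    (bStep t (lo, hi, rev)).2.1 ≤ t.length ∧
    (bStep t (lo, hi, rev)).2.1 - (bStep t (lo, hi, rev)).1 = hi - lo - 1 := by
  cases rev with
  | false =>
    have hstep : bStep t (lo, hi, false)
        = (lo, hi - 1, if t.getD (hi - 1) ' ' ≠ 'A' then true else false) := by
      simp [bStep]
    have hidx : hi - 1 < t.length := by omega
    have hgd : (t.drop lo)[hi - 1 - lo]? = some (t.getD (hi - 1) ' ') := by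
      rw [List.getElem?_drop, show lo + (hi - 1 - lo) = hi - 1 from by omega,
        List.getElem?_eq_getElem hidx, List.getD_eq_getElem t ' ' hidx]
    have hseg : (t.drop lo).take (hi - lo)
        = (t.drop lo).take (hi - 1 - lo) ++ [t.getD (hi - 1) ' '] := by
      rw [show hi - lo = (hi - 1 - lo) + 1 from by omega, List.take_add_one, hgd]
      rfl
    refine ⟨?_, by rw [hstep]; dsimp only; omega, by rw [hstep]; dsimp only; omega, by rw [hstep]; dsimp only; omega⟩
    rw [hstep]
    by_cases hA : t.getD (hi - 1) ' ' = 'A' <;>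
      simp [pvView, popOnce, hseg, List.getLast?_concat, List.dropLast_concat, hA]
  | true =>
    have hstep : bStep t (lo, hi, true)
        = (lo + 1, hi, if t.getD lo ' ' ≠ 'A' then false else true) := by
      simp [bStep]
    have hlo' : lo < t.length := by omega
    have hseg : (t.drop lo).take (hi - lo)
        = t.getD lo ' ' :: (t.drop (lo + 1)).take (hi - (lo + 1)) := by
      rw [List.drop_eq_getElem_cons hlo', List.getD_eq_getElem t ' ' hlo',
        show hi - lo = (hi - (lo + 1)) + 1 from by omega, List.take_succ_cons]
    refine ⟨?_, by rw [hstep]; dsimp only; omega, by rw [hstep]; dsimp only; omega, by rw [hstep]; dsimp only; omega⟩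
    rw [hstep]
    by_cases hA : t.getD lo ' ' = 'A' <;>
      simp [pvView, popOnce, hseg, List.reverse_cons, List.getLast?_concat,
        List.dropLast_concat, hA]

theorem bLoop_view (t : List Char) : ∀ (k lo hi : Nat) (rev : Bool),
    hi ≤ t.length → k ≤ hi - lo →
    pvView t (bLoop t k (lo, hi, rev)) = popIter k (pvView t (lo, hi, rev)) := by
  intro k
  induction k with
  | zero => intro lo hi rev _ _; rfl
  | succ k ih =>
    intro lo hi rev hhi hk
    have hlo : lo < hi := by omega
    obtain ⟨hview, h1, h2, h3⟩ := bStep_view t lo hi rev hlo hhi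
    rw [bLoop, popIter, ← hview]
    rcases hEq : bStep t (lo, hi, rev) with ⟨lo', hi', rev'⟩
    rw [hEq] at h1 h2 h3
    simp only at h1 h2 h3
    exact ih lo' hi' rev' h2 (by omega)

-- ===== VERDICT (by name: the statement is the Claim_ definition above) =====
theorem t_to_s_spec : Claim_equal_t_to_s := by
  intro s t _
  unfold Spec_t_to_s t_to_s t_to_s_alt
  set sl := s.toList with hsl
  set tl := t.toList with htl
  by_cases hguard : sl = [] ∨ tl.length < sl.length
  · rw [if_pos hguard]
    refine tsLoopA_zero sl tl.length tl le_rfl ?_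
    tauto
  · rw [if_neg hguard]
    push_neg at hguard
    obtain ⟨hs, hlen⟩ := hguard
    have hk : tl.length = sl.length + (tl.length - sl.length) := by omega
    rw [tsLoopA_char sl hs (tl.length - sl.length) tl hk]
    have hview0 : pvView tl (0, tl.length, false) = tl := by
      simp [pvView]
    have hbl := bLoop_view tl (tl.length - sl.length) 0 tl.length false (le_refl _) (by omega)
    rw [hview0] at hbl
    rw [← hbl]
    rcases hEq : bLoop tl (tl.length - sl.length) (0, tl.length, false) with ⟨lo, hi, rev⟩
    simp only [pvView, PySem.List.slice_natCast]
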